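-- pv_equiv track=rewrite | github.com/Natika31/Maths | Cholesky.py | matToString
-- ===== SOURCE A (Python) =====
-- def matToString(mat):
-- 	a = mat[2:-2]
-- 	text = ""
-- 	hello = 0
-- 	for i in range(len(a)):
-- 		if (a[i] == ']'):
-- 			hello = 1
-- 		elif (a[i] == '[') & hello == 1:
-- 			hello = 0
-- 			text += ';'
-- 		elif hello == 0:
-- 			text += a[i]
--
-- 	return text
-- ===== SOURCE B (Python) =====
-- def matToString(mat):
--     a = mat[2:-2]
--     text = []
--     while a:
--         c, a = a[0], a[1:]
--         if c == ']':
--             j = a.find('[')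
--             if j == -1:
--                 break
--             text.append(';')
--             a = a[j+1:]
--         else:
--             text.append(c)
--     return ''.join(text)
-- ===== Notes on version B (the rewrite author's own statement) =====
-- stated objective: alternative
-- what changed: Replaces the per-character flag state machine (hello 0/1) with an index-jumping loop that, on ']', uses str.find to jump straight past the whole gap to the next '[' (emitting ';') or stops if none, and collects output pieces in a list joined at the end.
import Mathlib
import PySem

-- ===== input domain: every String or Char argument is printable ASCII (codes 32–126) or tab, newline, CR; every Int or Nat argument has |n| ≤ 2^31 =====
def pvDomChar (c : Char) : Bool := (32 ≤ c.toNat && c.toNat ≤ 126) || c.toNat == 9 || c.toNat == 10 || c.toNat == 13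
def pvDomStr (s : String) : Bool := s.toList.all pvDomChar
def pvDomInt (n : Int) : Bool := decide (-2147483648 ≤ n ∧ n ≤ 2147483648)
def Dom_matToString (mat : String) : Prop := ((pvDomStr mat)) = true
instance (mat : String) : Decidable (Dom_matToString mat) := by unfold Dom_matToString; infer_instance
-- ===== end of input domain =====

-- B replaces A's per-character 0/1-flag state machine by a find-jumping loop: same output, alternative structure (not faster).

-- ===== PORT A =====
-- the body of A's for-loop: state is (text so far, hello flag)
def pvStepA (st : List Char × Int) (c : Char) : List Char × Int :=
  if c = ']' then (st.1, 1)
  else if c = '[' ∧ st.2 = 1 then (st.1 ++ [';'], 0)   -- ((a[i]=='[') & hello) == 1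
  else if st.2 = 0 then (st.1 ++ [c], st.2)
  else st

def matToString (mat : String) : String :=
  -- a = mat[2:-2]; text = ""; hello = 0; the for-loop is the fold of pvStepA
  String.ofList ((PySem.List.slice mat.toList (some 2) (some (-2))).foldl pvStepA ([], 0)).1

-- ===== PORT B =====
-- a.find('[') for the one-character needle, hand-ported as the obvious first-index scan (exact for a 1-char needle)
def pvFindBr : List Char → Int
  | [] => -1
  | c :: cs => if c = '[' then 0 else (let r := pvFindBr cs; if r = -1 then -1 else r + 1)

-- B's while loop over the remaining suffix of a
def pvLoopB (text : List Char) : List Char → List Char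
  | [] => text
  | c :: a =>
    if c = ']' then
      let j := pvFindBr a
      if j = -1 then text
      else pvLoopB (text ++ [';']) (a.drop (j.toNat + 1))
    else pvLoopB (text ++ [c]) a
termination_by a => a.length
decreasing_by
  · simp [Nat.lt_succ_of_le (Nat.sub_le _ _)]
  · simp

def matToString_alt (mat : String) : String :=
  -- a = mat[2:-2]; the while loop is pvLoopB over the remaining suffix
  String.ofList (pvLoopB [] (PySem.List.slice mat.toList (some 2) (some (-2))))

-- ===== PRECONDITION & SPEC =====
def Spec_matToString (mat : String) (out : String) : Prop := out = matToString_alt mat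
instance (mat : String) (out : String) : Decidable (Spec_matToString mat out) := by unfold Spec_matToString; infer_instance

-- ===== CLAIM (what is proved, stated in full; the proofs are below) =====
def Claim_equal_matToString : Prop := ∀ (mat : String), Dom_matToString mat → Spec_matToString mat (matToString mat)

-- ===== LEMMAS AND PROOFS =====

-- clean per-character recursions: copy mode / skip mode
mutual
def pvCopy (text : List Char) : List Char → List Char
  | [] => text
  | c :: cs => if c = ']' then pvSkip text cs else pvCopy (text ++ [c]) cs
def pvSkip (text : List Char) : List Char → List Char
  | [] => text
  | c :: cs => if c = '[' then pvCopy (text ++ [';']) cs else pvSkip text cs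
end

theorem pvFindBr_nonneg (cs : List Char) (h : pvFindBr cs ≠ -1) : 0 ≤ pvFindBr cs := by
  induction cs with
  | nil => simp [pvFindBr] at h
  | cons c cs ih =>
    by_cases hc : c = '['
    · simp [pvFindBr, hc]
    · simp only [pvFindBr, if_neg hc] at h ⊢
      by_cases hr : pvFindBr cs = -1
      · simp [hr] at h
      · have := ih hr; simp [hr]; omega

theorem pvSkip_eq_find (cs : List Char) : ∀ text,
    pvSkip text cs =
      (if pvFindBr cs = -1 then text
       else pvCopy (text ++ [';']) (cs.drop ((pvFindBr cs).toNat + 1))) := by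
  induction cs with
  | nil => intro t; simp [pvSkip, pvFindBr]
  | cons c cs ih =>
    intro t
    by_cases hc : c = '['
    · simp [pvSkip, pvFindBr, hc]
    · simp only [pvSkip, pvFindBr, if_neg hc]
      by_cases hr : pvFindBr cs = -1
      · simp [hr, ih]
      · have h0 := pvFindBr_nonneg cs hr
        have ht : (pvFindBr cs + 1).toNat = (pvFindBr cs).toNat + 1 := by omega
        have hne : pvFindBr cs + 1 ≠ -1 := by omega
        simp [hr, ih, ht, hne]

theorem pvLoopB_cons (t : List Char) (c : Char) (cs : List Char) :
    pvLoopB t (c :: cs) =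
      if c = ']' then
        (if pvFindBr cs = -1 then t else pvLoopB (t ++ [';']) (cs.drop ((pvFindBr cs).toNat + 1)))
      else pvLoopB (t ++ [c]) cs := by
  rw [pvLoopB]

theorem pvLoopB_eq_copy (n : ℕ) : ∀ cs : List Char, cs.length ≤ n → ∀ text,
    pvLoopB text cs = pvCopy text cs := by
  induction n with
  | zero =>
    intro cs h t
    have : cs = [] := List.eq_nil_of_length_eq_zero (Nat.le_zero.mp h)
    subst this; rw [pvLoopB, pvCopy]
  | succ n ih =>
    intro cs h t
    cases cs with
    | nil => rw [pvLoopB, pvCopy]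
    | cons c cs =>
      rw [pvLoopB_cons, pvCopy]
      by_cases hc : c = ']'
      · rw [if_pos hc, if_pos hc, pvSkip_eq_find]
        by_cases hr : pvFindBr cs = -1
        · simp [hr]
        · rw [if_neg hr, if_neg hr]
          refine ih _ ?_ _
          have := Nat.sub_le cs.length ((pvFindBr cs).toNat + 1)
          simp only [List.length_drop]
          simp only [List.length_cons] at h
          omega
      · rw [if_neg hc, if_neg hc]
        exact ih _ (by simp at h; omega) _

theorem pvFold_eq (cs : List Char) : ∀ text,
    (cs.foldl pvStepA (text, 0)).1 = pvCopy text cs ∧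
    (cs.foldl pvStepA (text, 1)).1 = pvSkip text cs := by
  induction cs with
  | nil => intro t; simp [pvCopy, pvSkip]
  | cons c cs ih =>
    intro t
    constructor
    · by_cases hc : c = ']'
      · simpa [pvStepA, pvCopy, hc] using (ih t).2
      · simpa [pvStepA, pvCopy, hc] using (ih (t ++ [c])).1
    · by_cases hc : c = ']'
      · simpa [pvStepA, pvSkip, hc] using (ih t).2
      · by_cases hb : c = '['
        · simpa [pvStepA, pvSkip, hc, hb] using (ih (t ++ [';'])).1
        · simpa [pvStepA, pvSkip, hc, hb] using (ih t).2

-- ===== VERDICT (by name: the statement is the Claim_ definition above) =====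
theorem matToString_spec : Claim_equal_matToString := by
  intro mat _
  unfold Spec_matToString matToString matToString_alt
  rw [(pvFold_eq _ []).1,
    pvLoopB_eq_copy (PySem.List.slice mat.toList (some 2) (some (-2))).length _ le_rfl]
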